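-- pv_equiv track=rewrite | github.com/VictorRocco/LayersBlocks_tfkeras | LayersBlocks/SubPixelUpSampling2D.py | _subpixelupsampling_factor_calculation
-- ===== SOURCE A (Python) =====
-- def _subpixelupsampling_factor_calculation(channels: int) -> bool:
--     factor = 2
--     for index in [2, 4, 8, 16, 32, 64, 128]:
--         if (index**2) <= channels:
--             factor = index
--         else:
--             break
--     return factor
-- ===== SOURCE B (Python) =====
-- import math
--
-- def _subpixelupsampling_factor_calculation(channels: int) -> bool:
--     # Largest power of two p with 2 <= p <= 128 and p*p <= channels, default 2.
--     if channels < 4: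
--         return 2
--     s = math.isqrt(channels)
--     return min(128, 1 << (s.bit_length() - 1))
-- ===== Notes on version B (the rewrite author's own statement) =====
-- stated objective: idiomatic
-- what changed: Replaced the candidate-scanning loop over [2,4,...,128] by a closed-form computation: floor-square-root, round down to a power of two via bit_length, clamp to 128.
import Mathlib
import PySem

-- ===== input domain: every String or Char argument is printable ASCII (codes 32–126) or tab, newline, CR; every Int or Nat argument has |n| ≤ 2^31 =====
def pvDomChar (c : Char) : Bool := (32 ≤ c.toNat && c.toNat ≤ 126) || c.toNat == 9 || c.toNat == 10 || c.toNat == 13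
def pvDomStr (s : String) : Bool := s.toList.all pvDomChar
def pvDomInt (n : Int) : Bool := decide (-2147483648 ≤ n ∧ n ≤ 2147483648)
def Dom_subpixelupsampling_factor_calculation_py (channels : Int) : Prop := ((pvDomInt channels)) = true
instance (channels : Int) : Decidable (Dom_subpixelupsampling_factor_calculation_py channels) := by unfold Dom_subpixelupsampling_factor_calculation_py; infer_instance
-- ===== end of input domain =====

-- B replaces A's candidate-scanning loop by a closed form (isqrt + bit_length + clamp); objective: idiomatic.

-- ===== PORT A =====
-- the 'for index in [...] ... else break' loop: recursion over the candidate list carrying 'factor'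
def pvALoop (channels : Int) : List Int → Int → Int
  | [], factor => factor
  | index :: rest, factor =>
      if index ^ 2 ≤ channels then pvALoop channels rest index else factor

def subpixelupsampling_factor_calculation_py (channels : Int) : Int :=
  pvALoop channels [2, 4, 8, 16, 32, 64, 128] 2

-- ===== PORT B =====
-- math.isqrt(channels) → Nat.sqrt channels.toNat (channels ≥ 4 > 0 on this branch);
-- 1 << (s.bit_length() - 1) → 2 ^ (PySem.Int.bitLength s - 1)
def subpixelupsampling_factor_calculation_py_alt (channels : Int) : Int :=
  if channels < 4 then 2
  else
    let s : Int := (Nat.sqrt channels.toNat : Int)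
    min 128 ((2 : Int) ^ (PySem.Int.bitLength s - 1))

-- ===== PRECONDITION & SPEC =====
def Spec_subpixelupsampling_factor_calculation_py (channels : Int) (out : Int) : Prop := out = subpixelupsampling_factor_calculation_py_alt channels
instance (channels : Int) (out : Int) : Decidable (Spec_subpixelupsampling_factor_calculation_py channels out) := by unfold Spec_subpixelupsampling_factor_calculation_py; infer_instance

-- ===== CLAIM (what is proved, stated in full; the proofs are below) =====
def Claim_equal_subpixelupsampling_factor_calculation_py : Prop := ∀ (channels : Int), Dom_subpixelupsampling_factor_calculation_py channels → Spec_subpixelupsampling_factor_calculation_py channels (subpixelupsampling_factor_calculation_py channels)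

-- ===== LEMMAS AND PROOFS =====

-- A's loop, evaluated: a cascade of threshold tests
theorem pvA_char (ch : Int) :
    subpixelupsampling_factor_calculation_py ch =
      if ch < 4 then 2 else if ch < 16 then 2 else if ch < 64 then 4
      else if ch < 256 then 8 else if ch < 1024 then 16 else if ch < 4096 then 32
      else if ch < 16384 then 64 else 128 := by
  simp only [subpixelupsampling_factor_calculation_py, pvALoop]
  norm_num
  split_ifs <;> omega

-- B on the interval [k^2, (2k)^2) (k = 2^e a power of two, s = isqrt ∈ [k, 2k)) returns k
-- bit_length of a Nat squeezed between consecutive powers of two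
theorem pvBitLen_eq (s e : Nat) (hlo : 2 ^ e ≤ s) (hhi : s < 2 ^ (e + 1)) :
    PySem.Int.bitLength (s : Int) = e + 1 := by
  have hspos : 0 < s := lt_of_lt_of_le (by positivity : 0 < 2 ^ e) hlo
  have hs0 : (s : Int) ≠ 0 := by exact_mod_cast hspos.ne'
  have habs : ((s : Int)).natAbs = s := rfl
  have hup : s < 2 ^ PySem.Int.bitLength (s : Int) := by
    simpa [habs] using PySem.Int.lt_two_pow_bitLength (s : Int)
  have hlow : 2 ^ (PySem.Int.bitLength (s : Int) - 1) ≤ s := by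
    simpa [habs] using PySem.Int.two_pow_bitLength_le (s : Int) hs0
  have h1 : e < PySem.Int.bitLength (s : Int) :=
    (Nat.pow_lt_pow_iff_right (by norm_num)).mp (lt_of_le_of_lt hlo hup)
  have h2 : PySem.Int.bitLength (s : Int) - 1 < e + 1 :=
    (Nat.pow_lt_pow_iff_right (by norm_num)).mp (lt_of_le_of_lt hlow hhi)
  omega

-- B on the interval [(2^e)^2, (2^(e+1))^2) (so isqrt ∈ [2^e, 2^(e+1))) returns 2^e
theorem pvB_char (ch : Int) (e : Nat) (he : 1 ≤ e) (h1 : ((2:Int) ^ e) ^ 2 ≤ ch) (h2 : ch < ((2:Int) ^ (e + 1)) ^ 2)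
    (hmin : (2:Int) ^ e ≤ 128) :
    subpixelupsampling_factor_calculation_py_alt ch = 2 ^ e := by
  have h4 : ¬ ch < 4 := by
    have : (4:Int) ≤ ((2:Int) ^ e) ^ 2 := by
      have : (2:Int) ^ 1 ≤ 2 ^ e := pow_le_pow_right₀ (by norm_num) he
      nlinarith
    omega
  have hch0 : 0 ≤ ch := by omega
  have hcast : ((ch.toNat : Int)) = ch := Int.toNat_of_nonneg hch0
  have h1n : 2 ^ e * 2 ^ e ≤ ch.toNat := by
    have : ((2 ^ e * 2 ^ e : Nat) : Int) ≤ (ch.toNat : Int) := by push_cast; rw [hcast]; nlinarith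
    exact_mod_cast this
  have h2n : ch.toNat < 2 ^ (e + 1) * 2 ^ (e + 1) := by
    have : (ch.toNat : Int) < ((2 ^ (e + 1) * 2 ^ (e + 1) : Nat) : Int) := by push_cast; rw [hcast]; nlinarith
    exact_mod_cast this
  have hslo : 2 ^ e ≤ Nat.sqrt ch.toNat := Nat.le_sqrt.mpr h1n
  have hshi : Nat.sqrt ch.toNat < 2 ^ (e + 1) := Nat.sqrt_lt.mpr h2n
  have hbl : PySem.Int.bitLength ((Nat.sqrt ch.toNat : Nat) : Int) = e + 1 := pvBitLen_eq _ e hslo hshi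
  simp only [subpixelupsampling_factor_calculation_py_alt, if_neg h4, hbl,
    Nat.add_sub_cancel]
  exact min_eq_right hmin

-- B for channels ≥ 16384 (isqrt ≥ 128): the clamp fires
theorem pvB_top (ch : Int) (h : 16384 ≤ ch) :
    subpixelupsampling_factor_calculation_py_alt ch = 128 := by
  have h4 : ¬ ch < 4 := by omega
  have h1n : 128 * 128 ≤ ch.toNat := by omega
  have hslo : 128 ≤ Nat.sqrt ch.toNat := Nat.le_sqrt.mpr h1n
  set s : Nat := Nat.sqrt ch.toNat with hs
  have hsabs : ((s : Int)).natAbs = s := rfl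
  have hup : s < 2 ^ PySem.Int.bitLength (s : Int) := by
    have := PySem.Int.lt_two_pow_bitLength (s : Int)
    simpa [hsabs] using this
  have hbl : 8 ≤ PySem.Int.bitLength (s : Int) := by
    by_contra hcon
    have : PySem.Int.bitLength (s : Int) ≤ 7 := by omega
    have : (2:Nat) ^ PySem.Int.bitLength (s : Int) ≤ 2 ^ 7 := Nat.pow_le_pow_right (by norm_num) this
    omega
  have hge : (128 : Int) ≤ 2 ^ (PySem.Int.bitLength (s : Int) - 1) := by
    have h7 : 7 ≤ PySem.Int.bitLength (s : Int) - 1 := by omega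
    calc (128 : Int) = 2 ^ 7 := by norm_num
      _ ≤ 2 ^ (PySem.Int.bitLength (s : Int) - 1) := pow_le_pow_right₀ (by norm_num) h7
  simp only [subpixelupsampling_factor_calculation_py_alt, if_neg h4, ← hs]
  exact min_eq_left hge

theorem subpixelupsampling_factor_calculation_py_spec : Claim_equal_subpixelupsampling_factor_calculation_py := by
  intro ch _
  show _ = subpixelupsampling_factor_calculation_py_alt ch
  rw [pvA_char]
  split_ifs with c1 c2 c3 c4 c5 c6 c7
  · simp [subpixelupsampling_factor_calculation_py_alt, c1]
  · rw [pvB_char ch 1 (by norm_num) (by norm_num; omega) (by norm_num; omega) (by norm_num)]; norm_num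
  · rw [pvB_char ch 2 (by norm_num) (by norm_num; omega) (by norm_num; omega) (by norm_num)]; norm_num
  · rw [pvB_char ch 3 (by norm_num) (by norm_num; omega) (by norm_num; omega) (by norm_num)]; norm_num
  · rw [pvB_char ch 4 (by norm_num) (by norm_num; omega) (by norm_num; omega) (by norm_num)]; norm_num
  · rw [pvB_char ch 5 (by norm_num) (by norm_num; omega) (by norm_num; omega) (by norm_num)]; norm_num
  · rw [pvB_char ch 6 (by norm_num) (by norm_num; omega) (by norm_num; omega) (by norm_num)]; norm_num
  · rw [pvB_top ch (by omega)]
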